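-- pv_equiv track=rewrite | github.com/asilverthorn/suikoden_ref | event_parser/event_commands/event_com_commands.py | obj_efct_con_var_len
-- ===== SOURCE A (Python) =====
-- from typing import List
--
-- def obj_efct_con_var_len(event_json: List[int], param_idx: int) -> List[int]:
-- 	'''
-- 	if param[0] == 0, length = 2, else if param[0] == 1, length = 3
-- 	'''
-- 	params = []
-- 	params.append(event_json[param_idx])
-- 	param_idx += 1
--
-- 	if params[0] == 0:
-- 		# read 1 more
-- 		params.append(event_json[param_idx])
-- 		param_idx += 1
-- 	elif params[0] == 1:
-- 		# read 2 more
-- 		for i in range(2):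
-- 			params.append(event_json[param_idx])
-- 			param_idx += 1
-- 	else:
-- 		raise ValueError(f"ObjEfctCon's first param is neither 0 or 1. Value read: {params[0]} @ {param_idx-1}")
-- 	return params
-- ===== SOURCE B (Python) =====
-- def obj_efct_con_var_len(event_json, param_idx):
--     first = event_json[param_idx]
--     if first not in (0, 1):
--         raise ValueError(f"ObjEfctCon's first param is neither 0 or 1. Value read: {first} @ {param_idx}")
--
--     def read(idx, remaining):
--         if remaining == 0:
--             return []
--         return [event_json[idx]] + read(idx + 1, remaining - 1)
--
--     # total length is 2 + first (2 when first == 0, 3 when first == 1)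
--     return read(param_idx, 2 + first)
-- ===== Notes on version B (the rewrite author's own statement) =====
-- stated objective: alternative
-- what changed: Validates the tag once, derives the total length by the closed-form 2+first instead of per-case branches, and builds the result by structural recursion on the remaining count rather than A's iterative per-branch appends with a mutated index.
import Mathlib
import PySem

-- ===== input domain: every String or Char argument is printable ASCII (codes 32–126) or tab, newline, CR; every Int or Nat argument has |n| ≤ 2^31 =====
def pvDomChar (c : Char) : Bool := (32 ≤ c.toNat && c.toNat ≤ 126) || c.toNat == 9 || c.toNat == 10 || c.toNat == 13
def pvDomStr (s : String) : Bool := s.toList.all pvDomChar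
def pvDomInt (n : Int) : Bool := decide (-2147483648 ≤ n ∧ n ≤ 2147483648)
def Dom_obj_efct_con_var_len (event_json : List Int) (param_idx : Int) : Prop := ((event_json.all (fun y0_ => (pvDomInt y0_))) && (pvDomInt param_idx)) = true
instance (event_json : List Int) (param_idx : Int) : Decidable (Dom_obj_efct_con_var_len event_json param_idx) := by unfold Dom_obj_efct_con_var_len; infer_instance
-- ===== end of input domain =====

-- B validates the tag once, computes the length as 2+first in closed form, and
-- builds the result by structural recursion on the count (objective: alternative).


-- ===== PORT A =====
-- A: append the first param, then branch on its value to append 1 more (if 0)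
-- or 2 more via a loop (if 1); the 'else' branch raises (excluded by Pre_).
def obj_efct_con_var_len (event_json : List Int) (param_idx : Int) : List Int :=
  let params : List Int := [(PySem.List.pyGet? event_json param_idx).getD 0]
  let param_idx := param_idx + 1
  if params.headD 0 = 0 then
    params ++ [(PySem.List.pyGet? event_json param_idx).getD 0]
  else if params.headD 0 = 1 then
    -- for i in range(2): params.append(event_json[param_idx]); param_idx += 1
    (List.foldl
      (fun (st : List Int × Int) _ =>
        (st.1 ++ [(PySem.List.pyGet? event_json st.2).getD 0], st.2 + 1))
      (params, param_idx) (PySem.List.pyRange 0 2 1)).1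
  else
    params  -- raise ValueError: unreachable under Pre_

-- ===== PORT B =====
-- B's recursive helper read(idx, remaining): [] when remaining == 0, else
-- event_json[idx] consed onto the rest. 'remaining' is always ≥ 0 in B (it is
-- 2 + first with first ∈ {0,1}), so Nat recursion is exact.
def pvAltRead (event_json : List Int) (idx : Int) : Nat → List Int
  | 0 => []
  | n + 1 => (PySem.List.pyGet? event_json idx).getD 0 :: pvAltRead event_json (idx + 1) n

-- B: first = event_json[param_idx]; raise unless first in (0,1) (excluded by
-- Pre_); return read(param_idx, 2 + first).
def obj_efct_con_var_len_alt (event_json : List Int) (param_idx : Int) : List Int :=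
  let first := (PySem.List.pyGet? event_json param_idx).getD 0
  if ¬(first = 0 ∨ first = 1) then
    []  -- raise ValueError: unreachable under Pre_
  else
    pvAltRead event_json param_idx (2 + first).toNat

-- ===== PRECONDITION & SPEC =====
-- Pre_: the first read succeeds and yields 0 or 1 (else A raises ValueError),
-- and the 1 (resp. 2) following reads are in range (else IndexError).
def Pre_obj_efct_con_var_len (event_json : List Int) (param_idx : Int) : Prop :=
  ∃ v, PySem.List.pyGet? event_json param_idx = some v ∧
    ((v = 0 ∧ (PySem.List.pyGet? event_json (param_idx + 1)).isSome) ∨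
     (v = 1 ∧ (PySem.List.pyGet? event_json (param_idx + 1)).isSome ∧
              (PySem.List.pyGet? event_json (param_idx + 2)).isSome))
instance (event_json : List Int) (param_idx : Int) : Decidable (Pre_obj_efct_con_var_len event_json param_idx) := by
  unfold Pre_obj_efct_con_var_len
  infer_instance

def pvWitness_obj_efct_con_var_len : List Int × Int := ([1, 5, 7], 0)

def Spec_obj_efct_con_var_len (event_json : List Int) (param_idx : Int) (out : List Int) : Prop := out = obj_efct_con_var_len_alt event_json param_idx
instance (event_json : List Int) (param_idx : Int) (out : List Int) : Decidable (Spec_obj_efct_con_var_len event_json param_idx out) := by unfold Spec_obj_efct_con_var_len; infer_instance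

-- ===== CLAIM (what is proved, stated in full; the proofs are below) =====
def Claim_equal_obj_efct_con_var_len : Prop := ∀ (event_json : List Int) (param_idx : Int), Dom_obj_efct_con_var_len event_json param_idx → Pre_obj_efct_con_var_len event_json param_idx → Spec_obj_efct_con_var_len event_json param_idx (obj_efct_con_var_len event_json param_idx)

-- ===== LEMMAS AND PROOFS =====

-- ===== VERDICT (by name: the statement is the Claim_ definition above) =====
theorem obj_efct_con_var_len_spec : Claim_equal_obj_efct_con_var_len := by
  intro ej pi _ hpre
  obtain ⟨v, hv, hcase⟩ := hpre
  unfold Spec_obj_efct_con_var_len obj_efct_con_var_len obj_efct_con_var_len_alt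
  rcases hcase with ⟨h0, _⟩ | ⟨h1, _, _⟩ <;> subst_vars <;>
    simp [hv, pvAltRead, add_assoc, PySem.List.pyRange, List.range_succ, List.foldl]
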